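-- pv_equiv track=rewrite | github.com/ZktAk/ZeTTTa-3 | src/game_utils.py | get_legal_indices
-- ===== SOURCE A (Python) =====
-- def get_legal_indices(bitboards):
-- 	"""Identify legal move indices from the Tic-Tac-Toe bitboards.
--
-- 	Args:
-- 	 bitboards (list): List of three bitboards [x, y, empty] representing the game state.
--
-- 	Returns:
-- 	 list: List of indices (0-8) corresponding to empty squares where a move is legal.
-- 	"""
-- 	x, y, _ = bitboards  # Unpack bitboards
-- 	arr = []
-- 	for n in range(9):
-- 		test = (0b1 << n)  # Create a bitmask for position n
-- 		if _ & test == test:  # Check if the position is empty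
-- 			arr.append(n)
-- 	return arr
-- ===== SOURCE B (Python) =====
-- def get_legal_indices(bitboards):
--     """Identify legal move indices by iterating only over the set bits of the
--     empty-squares bitboard (lowest-set-bit extraction) instead of testing all 9 squares."""
--     x, y, empty = bitboards
--     arr = []
--     m = empty & 0x1FF
--     while m:
--         low = m & -m              # isolate lowest set bit
--         arr.append(low.bit_length() - 1)
--         m ^= low                  # clear it
--     return arr
-- ===== Notes on version B (the rewrite author's own statement) =====
-- stated objective: alternative
-- what changed: Instead of scanning all 9 positions and testing each bitmask, B masks the empty board to its low 9 bits once and iterates only over the actual set bits, extracting each lowest set bit and its index via bit_length.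
import Mathlib
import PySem

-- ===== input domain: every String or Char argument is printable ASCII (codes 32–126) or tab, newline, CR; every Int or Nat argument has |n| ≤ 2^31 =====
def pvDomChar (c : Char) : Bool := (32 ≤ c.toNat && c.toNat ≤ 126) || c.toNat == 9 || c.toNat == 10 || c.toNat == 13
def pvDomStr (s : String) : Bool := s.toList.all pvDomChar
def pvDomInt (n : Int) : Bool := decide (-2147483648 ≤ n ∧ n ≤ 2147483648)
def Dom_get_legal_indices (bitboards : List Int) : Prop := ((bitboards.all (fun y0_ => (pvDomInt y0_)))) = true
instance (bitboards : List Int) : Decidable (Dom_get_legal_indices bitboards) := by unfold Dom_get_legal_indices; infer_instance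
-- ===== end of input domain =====

-- B iterates only over the set bits of the empty bitboard (lowest-set-bit extraction)
-- instead of scanning all 9 positions; same result, a different algorithm (not claimed faster).

-- ===== PORT A =====
-- for n in range(9): test = 1 << n; if _ & test == test: arr.append(n)
def get_legal_indices (bitboards : List Int) : List Int :=
  match bitboards with
  | [_x, _y, e] =>
      (List.range 9).foldl
        (fun (arr : List Int) (n : Nat) =>
          let test : Int := (1 : Int) <<< n
          if PySem.Int.band e test == test then arr ++ [(n : Int)] else arr) []
  | _ => []   -- outside Pre_ (Python unpacking raises ValueError)

-- ===== PORT B =====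
-- while m: low = m & -m; arr.append(low.bit_length() - 1); m ^= low
-- fuel 9 is a totality bound only: m = empty & 0x1FF has at most 9 set bits and
-- each iteration clears one, so the guard 'm ≠ 0' always ends the loop first.
def pvBitLoop : Nat → Int → List Int → List Int
  | 0, _, arr => arr
  | fuel + 1, m, arr =>
      if m ≠ 0 then
        let low := PySem.Int.band m (-m)
        pvBitLoop fuel (PySem.Int.bxor m low) (arr ++ [((PySem.Int.bitLength low : Int) - 1)])
      else arr

-- 'x, y, empty = bitboards': yields the three boards iff the list has exactly 3 elements
def pvUnpack3 (bitboards : List Int) : Option (Int × Int × Int) :=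
  match bitboards with
  | [] => none
  | a :: t1 =>
    match t1 with
    | [] => none
    | b :: t2 =>
      match t2 with
      | [] => none
      | c :: t3 =>
        match t3 with
        | [] => some (a, b, c)
        | _ :: _ => none

def get_legal_indices_alt (bitboards : List Int) : List Int :=
  match pvUnpack3 bitboards with
  | some (_x, _y, e) => pvBitLoop 9 (PySem.Int.band e 511) []
  | none => []   -- outside Pre_ (Python unpacking raises ValueError)

-- ===== PRECONDITION & SPEC =====
-- Python's 'x, y, _ = bitboards' raises ValueError unless the list has exactly 3 elements.
def Pre_get_legal_indices (bitboards : List Int) : Prop := bitboards.length = 3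
instance (bitboards : List Int) : Decidable (Pre_get_legal_indices bitboards) := by
  unfold Pre_get_legal_indices; infer_instance
def pvWitness_get_legal_indices : List Int := [5, 2, 488]

def Spec_get_legal_indices (bitboards : List Int) (out : List Int) : Prop := out = get_legal_indices_alt bitboards
instance (bitboards : List Int) (out : List Int) : Decidable (Spec_get_legal_indices bitboards out) := by unfold Spec_get_legal_indices; infer_instance

-- ===== CLAIM (what is proved, stated in full; the proofs are below) =====
def Claim_equal_get_legal_indices : Prop := ∀ (bitboards : List Int), Dom_get_legal_indices bitboards → Pre_get_legal_indices bitboards → Spec_get_legal_indices bitboards (get_legal_indices bitboards)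

-- ===== LEMMAS AND PROOFS =====

-- a.ldiff b + (a &&& b) = a  (binary induction)
theorem pv_ldiff_add_and (a b : Nat) : a.ldiff b + (a &&& b) = a := by
  induction a using Nat.binaryRec generalizing b with
  | zero => simp [Nat.ldiff]
  | bit x n ih =>
      conv_lhs => rw [← Nat.bit_bodd_div2 b]
      rw [Nat.ldiff_bit, Nat.land_bit]
      have := ih b.div2
      cases x <;> cases hb : b.bodd <;>
        simp [Nat.bit] at * <;> omega

theorem pv_sub_and (a b : Nat) : a - (a &&& b) = a.ldiff b := by
  have := pv_ldiff_add_and a b; omega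

-- masking with 511 does not change bits 0..8
theorem pv_band511 (e : Int) (n : Nat) (hn : n < 9) :
    PySem.Int.band (PySem.Int.band e 511) ((1 : Int) <<< n) = PySem.Int.band e ((1 : Int) <<< n) := by
  have hpow : (1 : Int) <<< n = ((2 ^ n : Nat) : Int) := by
    rw [Int.shiftLeft_eq]; push_cast; ring
  have h511 : ∀ i, (511 : Nat).testBit i = decide (i < 9) := by
    intro i
    have : (511 : Nat) = 2 ^ 9 - 1 := by norm_num
    rw [this, Nat.testBit_two_pow_sub_one]
  rcases (by omega : 0 ≤ e ∨ e < 0) with he | he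
  · -- e ≥ 0
    have h1 : PySem.Int.band e 511 = ((e.toNat &&& 511 : Nat) : Int) := by
      simpa using PySem.Int.band_of_nonneg he (by norm_num)
    rw [h1, hpow, PySem.Int.band_natCast,
        PySem.Int.band_of_nonneg he (Int.natCast_nonneg _), Int.toNat_natCast]
    congr 1
    apply Nat.eq_of_testBit_eq
    intro i
    simp only [Nat.testBit_and, h511, Nat.testBit_two_pow]
    by_cases hin : n = i
    · subst hin; simp [hn]
    · simp [hin]
  · -- e < 0
    have hk : (0 : Int) ≤ -e - 1 := by omega
    set k : Nat := (-e - 1).toNat with hkdef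
    have hb1 : PySem.Int.band e 511 = ((511 - (511 &&& k) : Nat) : Int) := by
      rw [PySem.Int.band_comm]
      unfold PySem.Int.band
      rw [if_pos (by norm_num : (0:Int) ≤ 511), if_neg (not_le.mpr he)]
      congr 1
    have hb2 : PySem.Int.band e ((1:Int) <<< n) = ((2 ^ n - (2 ^ n &&& k) : Nat) : Int) := by
      rw [PySem.Int.band_comm, hpow]
      unfold PySem.Int.band
      rw [if_pos (Int.natCast_nonneg _), if_neg (not_le.mpr he), Int.toNat_natCast]
    rw [hb1, hb2, hpow]
    rw [PySem.Int.band_of_nonneg (Int.natCast_nonneg _) (Int.natCast_nonneg _),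
        Int.toNat_natCast, Int.toNat_natCast]
    congr 1
    rw [pv_sub_and, pv_sub_and]
    apply Nat.eq_of_testBit_eq
    intro i
    simp only [Nat.testBit_and, Nat.testBit_ldiff, h511, Nat.testBit_two_pow]
    by_cases hin : n = i
    · subst hin; simp [hn]
    · simp [hin]

-- the masked board is a 9-bit nonnegative number
theorem pv_mask_bounds (e : Int) : 0 ≤ PySem.Int.band e 511 ∧ PySem.Int.band e 511 < 512 := by
  rw [PySem.Int.band_comm]
  unfold PySem.Int.band
  rcases (by omega : 0 ≤ e ∨ e < 0) with he | he
  · rw [if_pos (by norm_num : (0:Int) ≤ 511), if_pos he]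
    refine ⟨Int.natCast_nonneg _, ?_⟩
    have : (511:Int).toNat &&& e.toNat ≤ (511:Int).toNat := Nat.and_le_left
    omega
  · rw [if_pos (by norm_num : (0:Int) ≤ 511), if_neg (not_le.mpr he)]
    refine ⟨Int.natCast_nonneg _, ?_⟩
    have : ((511:Int).toNat - ((511:Int).toNat &&& (-e - 1).toNat) : Nat) ≤ (511:Int).toNat := by omega
    omega

-- the two loops agree on every 9-bit board (finite check)
set_option maxRecDepth 2000 in
theorem pv_core : ∀ v : Fin 512,
    (List.range 9).foldl
      (fun (arr : List Int) (n : Nat) =>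
        let test : Int := (1 : Int) <<< n
        if PySem.Int.band ((v.val : Nat) : Int) test == test then arr ++ [(n : Int)] else arr) []
    = pvBitLoop 9 ((v.val : Nat) : Int) [] := by decide

-- ===== VERDICT (by name: the statement is the Claim_ definition above) =====
theorem get_legal_indices_spec : Claim_equal_get_legal_indices := by
  intro bitboards _ hpre
  unfold Spec_get_legal_indices
  match bitboards, hpre with
  | [x, y, e], _ =>
    show (List.range 9).foldl
        (fun (arr : List Int) (n : Nat) =>
          let test : Int := (1 : Int) <<< n
          if PySem.Int.band e test == test then arr ++ [(n : Int)] else arr) []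
      = pvBitLoop 9 (PySem.Int.band e 511) []
    set m : Int := PySem.Int.band e 511 with hm
    obtain ⟨h0, h1⟩ := pv_mask_bounds e
    have hmn : m = ((m.toNat : Nat) : Int) := by omega
    have hlt : m.toNat < 512 := by omega
    have hA : (List.range 9).foldl
        (fun (arr : List Int) (n : Nat) =>
          let test : Int := (1 : Int) <<< n
          if PySem.Int.band e test == test then arr ++ [(n : Int)] else arr) []
      = (List.range 9).foldl
        (fun (arr : List Int) (n : Nat) =>
          let test : Int := (1 : Int) <<< n
          if PySem.Int.band m test == test then arr ++ [(n : Int)] else arr) [] := by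
      apply PySem.List.foldl_congr_mem
      intro arr n hn
      have hn9 : n < 9 := by simpa using hn
      simp only [hm, pv_band511 e n hn9]
    rw [hA, hmn]
    exact pv_core ⟨m.toNat, hlt⟩
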